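-- pv_equiv track=rewrite | github.com/jay-theriault/form-ocr | parse_ocr.py | get_most_common_option
-- ===== SOURCE A (Python) =====
-- from collections import Counter
--
-- def get_most_common_option(scraped_str1, scraped_str2, option_strs):
--     '''
--     Function to return the most common option string in two given strings. In case of a tie, return None.
--     Inputs:
--         scraped_str1, scraped_str2 (str) - Strings to search in.
--         option_strs (list of str) - List of option strings to count.
--     Outputs:
--         most_common_option (str) - Most common option string or None if there is a tie or no matches.
--     '''
--
--     counter = Counter()
--     for scraped_str in [scraped_str1, scraped_str2]:
--         for digit in scraped_str:
--             for option_str in option_strs: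
--                 if digit in option_str:
--                     counter[option_str] += 1
--
--     most_common = counter.most_common(2)  # get two most common option strings
--
--     # if there are multiple option strings with the same highest count, return NaN
--     if len(most_common) > 1 and most_common[0][1] == most_common[1][1]:
--         return None
--
--     if most_common:
--         return most_common[0][0]  # return the option string with the most occurrences
--
--     return None  # return None if no option string matches
-- ===== SOURCE B (Python) =====
-- from collections import Counter
--
-- def get_most_common_option(scraped_str1, scraped_str2, option_strs):
--     # One pass over the characters to build a char->multiplicity table, then one
--     # pass over the options; pick the unique strict maximum (ties/no match -> None).
--     char_counts = Counter(scraped_str1 + scraped_str2)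
--     counts = Counter()
--     for opt in option_strs:
--         counts[opt] += sum(n for c, n in char_counts.items() if c in opt)
--     mx = max(counts.values(), default=0)
--     if mx <= 0:
--         return None
--     winners = [o for o, n in counts.items() if n == mx]
--     return winners[0] if len(winners) == 1 else None
-- ===== Notes on version B (the rewrite author's own statement) =====
-- stated objective: faster
-- what changed: A scans every option string for every single character of both inputs (chars x options x option-length containment tests, then Counter.most_common sorting); B builds a char-multiplicity Counter once, computes each option's count with one pass over the distinct characters, and selects the unique strict maximum without sorting.
import Mathlib
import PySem

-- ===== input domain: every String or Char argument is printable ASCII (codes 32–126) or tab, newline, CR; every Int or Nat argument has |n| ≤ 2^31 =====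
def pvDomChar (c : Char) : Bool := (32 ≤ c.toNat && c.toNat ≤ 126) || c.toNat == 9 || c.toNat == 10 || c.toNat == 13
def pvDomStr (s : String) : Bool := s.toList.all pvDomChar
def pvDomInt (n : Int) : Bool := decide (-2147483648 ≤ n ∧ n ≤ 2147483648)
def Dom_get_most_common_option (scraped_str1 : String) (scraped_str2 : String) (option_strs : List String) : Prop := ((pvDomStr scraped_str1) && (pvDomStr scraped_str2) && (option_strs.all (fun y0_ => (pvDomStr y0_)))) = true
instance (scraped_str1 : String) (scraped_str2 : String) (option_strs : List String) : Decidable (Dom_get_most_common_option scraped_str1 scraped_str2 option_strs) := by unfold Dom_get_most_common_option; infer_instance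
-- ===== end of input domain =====

-- B replaces A's char × option containment triple loop by a char-multiplicity table built once
-- plus one scan over the options, then picks the unique strict maximum (alternative decomposition).

-- ===== PORT A =====
-- A: for each character of both strings, bump a Counter entry for every option string
-- containing it; then Counter.most_common(2) = stable sort by count, descending, take 2.
def get_most_common_option (scraped_str1 : String) (scraped_str2 : String) (option_strs : List String) : Option String :=
  let counter : PySem.Dict String Int :=
    [scraped_str1, scraped_str2].foldl (fun ctr scraped_str =>
      scraped_str.toList.foldl (fun ctr digit =>
        option_strs.foldl (fun ctr option_str =>
          if PySem.Chars.isIn [digit] option_str.toList then ctr.modify option_str 0 (· + 1)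
          else ctr) ctr) ctr) PySem.Dict.empty
  let most_common := (PySem.List.sorted counter.items (fun p => p.2) true).take 2
  match most_common with
  | [] => none
  | [a] => some a.1
  | a :: b :: _ => if a.2 = b.2 then none else some a.1

-- ===== PORT B =====
-- B (Source B): Counter of the characters once; per option, add the multiplicities of the distinct
-- characters it contains; a unique strict maximum wins, ties or no match give None.
def get_most_common_option_alt (scraped_str1 : String) (scraped_str2 : String) (option_strs : List String) : Option String :=
  let char_counts : PySem.Dict Char Int :=
    PySem.Dict.counter (scraped_str1.toList ++ scraped_str2.toList)
  let counts : PySem.Dict String Int :=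
    option_strs.foldl (fun d opt =>
      d.modify opt 0
        (· + ((char_counts.items.filter (fun p => PySem.Chars.isIn [p.1] opt.toList)).map (·.2)).sum))
      PySem.Dict.empty
  let mx := PySem.List.maxD counts.values (fun v => v) 0
  if mx ≤ 0 then none
  else
    match (counts.items.filter (fun p => p.2 == mx)).map (·.1) with
    | [w] => some w
    | _ => none

-- ===== PRECONDITION & SPEC =====
def Spec_get_most_common_option (scraped_str1 : String) (scraped_str2 : String) (option_strs : List String) (out : Option String) : Prop := out = get_most_common_option_alt scraped_str1 scraped_str2 option_strs
instance (scraped_str1 : String) (scraped_str2 : String) (option_strs : List String) (out : Option String) : Decidable (Spec_get_most_common_option scraped_str1 scraped_str2 option_strs out) := by unfold Spec_get_most_common_option; infer_instance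

-- ===== CLAIM (what is proved, stated in full; the proofs are below) =====
def Claim_equal_get_most_common_option : Prop := ∀ (scraped_str1 : String) (scraped_str2 : String) (option_strs : List String), Dom_get_most_common_option scraped_str1 scraped_str2 option_strs → Spec_get_most_common_option scraped_str1 scraped_str2 option_strs (get_most_common_option scraped_str1 scraped_str2 option_strs)

-- ===== LEMMAS AND PROOFS =====

-- character c occurs in option string o
def pvHit (c : Char) (o : String) : Bool := PySem.Chars.isIn [c] o.toList
-- number of characters of the two scraped strings occurring in o
def pvS (s1 s2 o : String) : Int := ((s1.toList ++ s2.toList).countP (fun c => pvHit c o) : Int)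
-- the final count both programs associate with option o
def pvF (s1 s2 : String) (opts : List String) (o : String) : Int := (opts.count o : Int) * pvS s1 s2 o
-- the flattened list of all increment events of A's triple loop
def pvBig (s1 s2 : String) (opts : List String) : List String :=
  (s1.toList ++ s2.toList).flatMap (fun c => opts.filter (fun o => pvHit c o))

-- A's result as a function of its counter's items list
def pvResA (items : List (String × Int)) : Option String :=
  match (PySem.List.sorted items (fun p => p.2) true).take 2 with
  | [] => none
  | [a] => some a.1
  | a :: b :: _ => if a.2 = b.2 then none else some a.1

-- B's result as a function of its counts' items list
def pvResB (items : List (String × Int)) : Option String :=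
  let mx := PySem.List.maxD (items.map (·.2)) (fun v => v) 0
  if mx ≤ 0 then none
  else
    match (items.filter (fun p => p.2 == mx)).map (·.1) with
    | [w] => some w
    | _ => none



lemma pv_counterA_eq (s1 s2 : String) (opts : List String) :
    [s1, s2].foldl (fun ctr s =>
      s.toList.foldl (fun ctr digit =>
        opts.foldl (fun ctr o =>
          if PySem.Chars.isIn [digit] o.toList then ctr.modify o 0 (· + 1) else ctr) ctr) ctr)
      PySem.Dict.empty = PySem.Dict.counter (pvBig s1 s2 opts) := by
  have hstep : (fun (ctr : PySem.Dict String Int) (digit : Char) =>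
      opts.foldl (fun ctr o =>
        if PySem.Chars.isIn [digit] o.toList then ctr.modify o 0 (· + 1) else ctr) ctr)
      = (fun (acc : PySem.Dict String Int) (c : Char) =>
        (opts.filter (fun o => pvHit c o)).foldl (fun d x => d.modify x 0 (· + 1)) acc) := by
    funext ctr c
    exact PySem.List.foldl_if_eq_foldl_filter (fun o => pvHit c o)
      (fun d x => d.modify x 0 (· + 1)) opts ctr
  rw [PySem.Dict.counter_eq_foldl, pvBig, List.foldl_flatMap]
  simp only [List.foldl_cons, List.foldl_nil, List.foldl_append, hstep]

lemma pv_count_big_aux (opts : List String) (o : String) :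
    ∀ cs : List Char, (cs.flatMap (fun c => opts.filter (fun o' => pvHit c o'))).count o
      = cs.countP (fun c => pvHit c o) * opts.count o := by
  intro cs
  induction cs with
  | nil => simp
  | cons c t ih =>
    simp only [List.flatMap_cons, List.count_append, List.countP_cons, ih]
    by_cases h : pvHit c o
    · rw [List.count_filter h, h]; simp; ring
    · have : o ∉ opts.filter (fun o' => pvHit c o') := by
        simp [List.mem_filter, h]
      rw [List.count_eq_zero.2 this]
      simp [h]

lemma pv_count_big (s1 s2 : String) (opts : List String) (o : String) :
    ((pvBig s1 s2 opts).count o : Int) = pvF s1 s2 opts o := by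
  rw [pvBig, pv_count_big_aux, pvF, pvS]
  push_cast; ring

lemma pv_mem_big (s1 s2 : String) (opts : List String) (o : String) :
    o ∈ pvBig s1 s2 opts ↔ o ∈ opts ∧ 0 < pvS s1 s2 o := by
  simp only [pvBig, List.mem_flatMap, List.mem_filter, pvS]
  rw [show ((0:Int) < ((s1.toList ++ s2.toList).countP (fun c => pvHit c o) : Int)) ↔
      0 < (s1.toList ++ s2.toList).countP (fun c => pvHit c o) from by exact_mod_cast Iff.rfl]
  rw [List.countP_pos_iff]
  tauto

lemma pv_getD_foldl_modify_add_const (T : String → Int) :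
    ∀ (l : List String) (d : PySem.Dict String Int) (o : String),
    (l.foldl (fun d x => d.modify x 0 (· + T x)) d).getD o 0 = d.getD o 0 + (l.count o : Int) * T o := by
  intro l
  induction l with
  | nil => intro d o; simp
  | cons x t ih =>
    intro d o
    simp only [List.foldl_cons, ih, PySem.Dict.getD_modify, List.count_cons]
    by_cases h : o = x
    · subst h; simp; ring
    · have hbe : (x == o) = false := by
        simp only [beq_eq_false_iff_ne]; exact fun hh => h hh.symm
      rw [if_neg h, hbe]
      simp

lemma pv_sum_indicator (x : Char) :
    ∀ (v : List Char), v.Nodup →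
      ((v.map (fun c => if c = x then (1 : Int) else 0)).sum = if x ∈ v then (1 : Int) else 0) := by
  intro v
  induction v with
  | nil => simp
  | cons c t ih =>
    intro hnd
    rcases List.nodup_cons.1 hnd with ⟨hc, hnt⟩
    simp only [List.map_cons, List.sum_cons, ih hnt, List.mem_cons]
    by_cases h : c = x
    · subst h; simp [hc]
    · simp [h, Ne.symm h]

lemma pv_sum_dedup_counts (p : Char → Bool) :
    ∀ (l u : List Char), u.Nodup → (∀ c ∈ l, c ∈ u) →
      (((u.filter p).map (fun c => (l.count c : Int))).sum = (l.countP p : Int)) := by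
  intro l
  induction l with
  | nil => intro u _ _; simp
  | cons x t ih =>
    intro u hnd hsub
    have hxt : ∀ c ∈ t, c ∈ u := fun c hc => hsub c (List.mem_cons_of_mem _ hc)
    have hx : x ∈ u := hsub x List.mem_cons_self
    have hcount : ∀ c : Char, ((x :: t).count c : Int)
        = (t.count c : Int) + (if c = x then (1:Int) else 0) := by
      intro c
      by_cases h : c = x
      · subst h; rw [List.count_cons_self, if_pos rfl]; push_cast; ring
      · simp only [List.count_cons, h]
        have : (x == c) = false := by
          simp only [beq_eq_false_iff_ne]; exact fun hh => h hh.symm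
        rw [this]
        simp
    calc ((u.filter p).map (fun c => ((x :: t).count c : Int))).sum
        = ((u.filter p).map (fun c => (t.count c : Int) + (if c = x then (1:Int) else 0))).sum := by
          congr 1; exact List.map_congr_left (fun c _ => hcount c)
      _ = ((u.filter p).map (fun c => (t.count c : Int))).sum
            + ((u.filter p).map (fun c => if c = x then (1:Int) else 0)).sum := by
          rw [← List.sum_map_add]
      _ = (t.countP p : Int) + (if x ∈ u.filter p then (1:Int) else 0) := by
          rw [ih u hnd hxt, pv_sum_indicator x (u.filter p) (List.Nodup.filter p hnd)]
      _ = ((x :: t).countP p : Int) := by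
          rw [List.countP_cons]
          by_cases hp : p x = true
          · have hmem : x ∈ u.filter p := List.mem_filter.2 ⟨hx, hp⟩
            rw [if_pos hmem, hp, if_pos rfl]
            push_cast; ring
          · have hmem : x ∉ u.filter p := fun hm => hp (List.mem_filter.1 hm).2
            rw [if_neg hmem, Bool.eq_false_iff.2 hp, if_neg (by simp)]
            push_cast; ring

lemma pv_filter_singleton {α : Type} (l : List α) (p : α → Bool) (x : α)
    (hnd : l.Nodup) (hx : x ∈ l) (hiff : ∀ y ∈ l, (p y = true ↔ y = x)) :
    l.filter p = [x] := by
  induction l with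
  | nil => cases hx
  | cons a t ih =>
    rcases List.nodup_cons.1 hnd with ⟨hat, hnt⟩
    by_cases hpa : p a = true
    · have hax : a = x := (hiff a List.mem_cons_self).1 hpa
      subst hax
      rw [List.filter_cons_of_pos hpa]
      have : t.filter p = [] := by
        rw [List.filter_eq_nil_iff]
        intro y hy hpy
        exact hat (((hiff y (List.mem_cons_of_mem _ hy)).1 hpy) ▸ hy)
      rw [this]
    · have hax : a ≠ x := fun h => hpa ((hiff a List.mem_cons_self).2 h)
      have hxt : x ∈ t := by
        rcases List.mem_cons.1 hx with h | h
        · exact absurd h.symm hax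
        · exact h
      rw [List.filter_cons_of_neg (by simpa using hpa)]
      exact ih hnt hxt (fun y hy => hiff y (List.mem_cons_of_mem _ hy))

lemma pv_maxD_ub (f : String → Int) (KB : List String) :
    ∀ o ∈ KB, f o ≤ PySem.List.maxD (KB.map f) (fun v => v) 0 := by
  intro o ho
  rcases hm : PySem.List.max? (KB.map f) (fun v => v) with _ | m
  · rw [PySem.List.max?_eq_none_iff] at hm
    exact absurd (List.mem_map_of_mem ho) (hm ▸ List.not_mem_nil)
  · have hd : PySem.List.maxD (KB.map f) (fun v => v) 0 = m := by
      rw [PySem.List.maxD, hm]; rfl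
    rw [hd]
    exact PySem.List.max?_isMax hm (f o) (List.mem_map_of_mem ho)

lemma pv_maxD_mem (f : String → Int) (KB : List String) :
    PySem.List.maxD (KB.map f) (fun v => v) 0 = 0
      ∨ ∃ o ∈ KB, f o = PySem.List.maxD (KB.map f) (fun v => v) 0 := by
  rcases KB with _ | ⟨k, ks⟩
  · left; rfl
  · right
    have hne : ((k :: ks).map f) ≠ [] := by simp
    have := PySem.List.maxD_mem ((k :: ks).map f) (fun v => v) 0 hne
    rcases List.mem_map.1 this with ⟨o, ho, hfo⟩
    exact ⟨o, ho, hfo⟩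

lemma pv_main (f : String → Int) (KA KB : List String)
    (hKA : KA.Nodup) (hKB : KB.Nodup)
    (hsub : ∀ o ∈ KA, o ∈ KB)
    (hpos : ∀ o ∈ KA, 0 < f o)
    (hzero : ∀ o ∈ KB, o ∉ KA → f o = 0) :
    pvResA (KA.map (fun k => (k, f k))) = pvResB (KB.map (fun o => (o, f o))) := by
  have hcomp2 : ((fun p : String × Int => p.2) ∘ fun o => (o, f o)) = f := rfl
  have hvals : ((KB.map (fun o => (o, f o))).map (fun p : String × Int => p.2)) = KB.map f := by
    rw [List.map_map, hcomp2]
  have hwinners : ∀ (q : Int),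
      ((KB.map (fun o => (o, f o))).filter (fun p => p.2 == q)).map (fun p : String × Int => p.1)
        = KB.filter (fun o => f o == q) := by
    intro q
    rw [List.filter_map, List.map_map]
    simp [Function.comp_def]
  set mx := PySem.List.maxD (KB.map f) (fun v => v) 0 with hmxdef
  have hmx_ub : ∀ o ∈ KB, f o ≤ mx := pv_maxD_ub f KB
  have hmx_mem : mx = 0 ∨ ∃ o ∈ KB, f o = mx := pv_maxD_mem f KB
  rw [pvResA, pvResB, hvals, ← hmxdef]
  rcases hsA : PySem.List.sorted (KA.map (fun k => (k, f k))) (fun p : String × Int => p.2) true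
      with _ | ⟨a, _ | ⟨b, t⟩⟩
  · -- no option matched: every count is 0, B's max is 0
    have hKAnil : KA = [] := List.map_eq_nil_iff.1
      ((PySem.List.sorted_eq_nil_iff _ _ _).1 hsA)
    have hmx0 : mx = 0 := by
      rcases hmx_mem with h | ⟨o, ho, hfo⟩
      · exact h
      · rw [← hfo]; exact hzero o ho (by simp [hKAnil])
    simp [hmx0]
  · -- exactly one option matched
    have hperm : (KA.map (fun k => (k, f k))).Perm [a] :=
      (hsA ▸ PySem.List.sorted_perm (KA.map (fun k => (k, f k))) (fun p : String × Int => p.2) true).symm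
    have hitems : KA.map (fun k => (k, f k)) = [a] := List.perm_singleton.1 hperm
    obtain ⟨k, hKAk, hak⟩ : ∃ k, KA = [k] ∧ (k, f k) = a := by
      rcases KA with _ | ⟨k, _ | _⟩ <;> simp_all
    have hk1 : a.1 = k := by rw [← hak]
    have hk2 : a.2 = f k := by rw [← hak]
    have hkKA : k ∈ KA := by simp [hKAk]
    have hkKB : k ∈ KB := hsub k hkKA
    have hkpos : 0 < f k := hpos k hkKA
    have hmxk : mx = f k := by
      rcases hmx_mem with h | ⟨o, ho, hfo⟩
      · exact absurd (h ▸ hmx_ub k hkKB) (by omega)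
      · by_cases hoKA : o ∈ KA
        · have : o = k := by rw [hKAk] at hoKA; simpa using hoKA
          rw [← hfo, this]
        · have h0 : f o = 0 := hzero o ho hoKA
          have := hmx_ub k hkKB
          omega
    have hguard : ¬ mx ≤ 0 := by omega
    rw [if_neg hguard, hwinners mx]
    have hfilter : KB.filter (fun o => f o == mx) = [k] := by
      apply pv_filter_singleton KB _ k hKB hkKB
      intro y hy
      simp only [beq_iff_eq]
      constructor
      · intro hfy
        by_contra hyk
        have h0 : f y = 0 := hzero y hy (fun hyKA => hyk (by rw [hKAk] at hyKA; simpa using hyKA))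
        omega
      · intro h; rw [h, hmxk]
    rw [hfilter]
    show some a.1 = (match [k] with | [w] => some w | _ => none)
    rw [hk1]
  · -- at least two options matched
    have hperm : (PySem.List.sorted (KA.map (fun k => (k, f k))) (fun p : String × Int => p.2) true).Perm
        (KA.map (fun k => (k, f k))) :=
      PySem.List.sorted_perm _ _ _
    have haitems : a ∈ KA.map (fun k => (k, f k)) :=
      (PySem.List.mem_sorted _ _ _ _).1 (by rw [hsA]; exact List.mem_cons_self)
    have hbitems : b ∈ KA.map (fun k => (k, f k)) :=
      (PySem.List.mem_sorted _ _ _ _).1 (by rw [hsA]; exact List.mem_cons_of_mem _ List.mem_cons_self)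
    obtain ⟨ka, hkaKA, hka⟩ := List.mem_map.1 haitems
    obtain ⟨kb, hkbKA, hkb⟩ := List.mem_map.1 hbitems
    have ha1 : a.1 = ka := by rw [← hka]
    have ha2 : a.2 = f ka := by rw [← hka]
    have hb1 : b.1 = kb := by rw [← hkb]
    have hb2 : b.2 = f kb := by rw [← hkb]
    have hkapos : 0 < f ka := hpos ka hkaKA
    -- head dominates all items
    have hub : ∀ y ∈ KA.map (fun k => (k, f k)), (fun p : String × Int => p.2) y ≤ a.2 :=
      PySem.List.key_head_sorted_rev_ge _ _ hsA
    -- distinct firsts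
    have hfstnodup : ((a :: b :: t).map (fun p : String × Int => p.1)).Nodup := by
      have hKAfst : (KA.map (fun k => (k, f k))).map (fun p : String × Int => p.1) = KA := by
        rw [List.map_map]; exact List.map_id KA
      have : ((a :: b :: t).map (fun p : String × Int => p.1)).Perm KA := by
        rw [← hKAfst, ← hsA]
        exact hperm.map _
      exact this.nodup_iff.2 hKA
    have hab1 : a.1 ≠ b.1 := by
      simp only [List.map_cons, List.nodup_cons, List.mem_cons] at hfstnodup
      exact fun h => hfstnodup.1 (Or.inl h)
    -- pairwise order
    have hpw := PySem.List.sorted_pairwise_rev (KA.map (fun k => (k, f k))) (fun p : String × Int => p.2)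
    rw [hsA] at hpw
    rcases List.pairwise_cons.1 hpw with ⟨hpa, hpw'⟩
    rcases List.pairwise_cons.1 hpw' with ⟨hpb, _⟩
    have hba : b.2 ≤ a.2 := hpa b List.mem_cons_self
    -- B's maximum is a.2
    have hmxa : mx = a.2 := by
      have hle : a.2 ≤ mx := by rw [ha2]; exact hmx_ub ka (hsub ka hkaKA)
      rcases hmx_mem with h | ⟨o, ho, hfo⟩
      · omega
      · by_cases hoKA : o ∈ KA
        · have : (o, f o) ∈ KA.map (fun k => (k, f k)) := List.mem_map_of_mem hoKA
          have h2 := hub (o, f o) this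
          simp only at h2
          omega
        · have h0 : f o = 0 := hzero o ho hoKA
          omega
    have hguard : ¬ mx ≤ 0 := by rw [hmxa, ha2]; omega
    rw [if_neg hguard, hwinners mx]
    show (if a.2 = b.2 then none else some a.1)
      = (match KB.filter (fun o => f o == mx) with | [w] => some w | _ => none)
    by_cases heq : a.2 = b.2
    · rw [if_pos heq]
      -- two distinct winners: B's winners list is not a singleton
      have haW : a.1 ∈ KB.filter (fun o => f o == mx) := by
        rw [List.mem_filter]
        exact ⟨ha1 ▸ hsub ka hkaKA, by simp [ha1, ← ha2, hmxa]⟩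
      have hbW : b.1 ∈ KB.filter (fun o => f o == mx) := by
        rw [List.mem_filter]
        exact ⟨hb1 ▸ hsub kb hkbKA, by simp [hb1, ← hb2, hmxa, ← heq]⟩
      rcases hW : KB.filter (fun o => f o == mx) with _ | ⟨w, _ | ⟨w2, ws⟩⟩
      · rfl
      · rw [hW] at haW hbW
        simp only [List.mem_singleton] at haW hbW
        exact absurd (haW.trans hbW.symm) hab1
      · rfl
    · rw [if_neg heq]
      have hblt : b.2 < a.2 := lt_of_le_of_ne hba (fun h => heq h.symm)
      have hfilter : KB.filter (fun o => f o == mx) = [a.1] := by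
        apply pv_filter_singleton KB _ a.1 hKB (ha1 ▸ hsub ka hkaKA)
        intro y hy
        simp only [beq_iff_eq]
        constructor
        · intro hfy
          by_contra hya
          by_cases hyKA : y ∈ KA
          · have hyitems : (y, f y) ∈ KA.map (fun k => (k, f k)) := List.mem_map_of_mem hyKA
            have hysorted : (y, f y) ∈ (a :: b :: t) := by
              rw [← hsA, PySem.List.mem_sorted]
              exact hyitems
            rcases List.mem_cons.1 hysorted with h | h
            · exact hya (by rw [← h])
            · rcases List.mem_cons.1 h with h' | h'
              · have hyb : f y = b.2 := by rw [← h']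
                rw [hmxa] at hfy; omega
              · have hyt := hpb (y, f y) h'
                simp only at hyt
                rw [hmxa] at hfy; omega
          · have h0 : f y = 0 := hzero y hy hyKA
            rw [hmxa, ha2] at hfy
            omega
        · intro h
          rw [h, ha1, hmxa, ha2]
      rw [hfilter]

lemma pv_T_eq (s1 s2 o : String) :
    (((PySem.Dict.counter (s1.toList ++ s2.toList)).items.filter
        (fun p => PySem.Chars.isIn [p.1] o.toList)).map (fun p : Char × Int => p.2)).sum
      = pvS s1 s2 o := by
  rw [PySem.Dict.items_counter, List.filter_map, List.map_map]
  have h1 : ((fun p : Char × Int => PySem.Chars.isIn [p.1] o.toList)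
      ∘ (fun k : Char => (k, (List.count k (s1.toList ++ s2.toList) : Int)))) = fun k => pvHit k o := rfl
  have h2 : ((fun p : Char × Int => p.2)
      ∘ (fun k : Char => (k, (List.count k (s1.toList ++ s2.toList) : Int))))
      = fun k => ((s1.toList ++ s2.toList).count k : Int) := rfl
  rw [h1, h2, pvS]
  exact pv_sum_dedup_counts _ _ _ (PySem.Set.nodup_ofList _)
    (fun c hc => (PySem.Set.mem_ofList _ _).2 hc)

lemma pv_A_eq (s1 s2 : String) (opts : List String) :
    get_most_common_option s1 s2 opts
      = pvResA ((PySem.Set.ofList (pvBig s1 s2 opts)).map (fun k => (k, pvF s1 s2 opts k))) := by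
  unfold get_most_common_option
  rw [pv_counterA_eq s1 s2 opts]
  show pvResA ((PySem.Dict.counter (pvBig s1 s2 opts)).items) = _
  rw [PySem.Dict.items_counter]
  congr 1
  exact List.map_congr_left (fun k _ => by rw [Prod.mk.injEq]; exact ⟨rfl, pv_count_big s1 s2 opts k⟩)

lemma pv_B_eq (s1 s2 : String) (opts : List String) :
    get_most_common_option_alt s1 s2 opts
      = pvResB ((PySem.Set.ofList opts).map (fun o => (o, pvF s1 s2 opts o))) := by
  unfold get_most_common_option_alt
  show pvResB ((opts.foldl (fun d opt =>
      d.modify opt 0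
        (· + (((PySem.Dict.counter (s1.toList ++ s2.toList)).items.filter
            (fun p => PySem.Chars.isIn [p.1] opt.toList)).map (·.2)).sum))
      PySem.Dict.empty).items) = _
  congr 1
  have hkeys : (opts.foldl (fun d opt =>
      d.modify opt 0
        (· + (((PySem.Dict.counter (s1.toList ++ s2.toList)).items.filter
            (fun p => PySem.Chars.isIn [p.1] opt.toList)).map (·.2)).sum))
      PySem.Dict.empty).keys = PySem.Set.ofList opts := by
    rw [PySem.Dict.keys_foldl_modify (d0 := (0 : Int))
      (f := fun (_ : PySem.Dict String Int) (opt : String) =>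
        (· + (((PySem.Dict.counter (s1.toList ++ s2.toList)).items.filter
            (fun p => PySem.Chars.isIn [p.1] opt.toList)).map (·.2)).sum))]
    rfl
  rw [PySem.Dict.items_eq_map_keys _ (hkeys ▸ PySem.Set.nodup_ofList opts) 0, hkeys]
  refine List.map_congr_left (fun o _ => ?_)
  rw [Prod.mk.injEq]
  refine ⟨rfl, ?_⟩
  rw [pv_getD_foldl_modify_add_const _ opts PySem.Dict.empty o]
  rw [pv_T_eq s1 s2 o]
  simp [pvF]

-- ===== VERDICT (by name: the statement is the Claim_ definition above) =====
theorem get_most_common_option_spec : Claim_equal_get_most_common_option := by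
  intro s1 s2 opts _
  unfold Spec_get_most_common_option
  rw [pv_A_eq, pv_B_eq]
  apply pv_main
  · exact PySem.Set.nodup_ofList _
  · exact PySem.Set.nodup_ofList _
  · intro o ho
    rw [PySem.Set.mem_ofList] at ho ⊢
    exact ((pv_mem_big s1 s2 opts o).1 ho).1
  · intro o ho
    rw [PySem.Set.mem_ofList] at ho
    rcases (pv_mem_big s1 s2 opts o).1 ho with ⟨hmem, hS⟩
    have hc : 0 < opts.count o := List.count_pos_iff.2 hmem
    have : (0 : Int) < (opts.count o : Int) := by exact_mod_cast hc
    exact mul_pos this hS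
  · intro o _ hnot
    rw [PySem.Set.mem_ofList] at hnot
    rw [pv_mem_big] at hnot
    push Not at hnot
    by_cases hmem : o ∈ opts
    · have hS0 : pvS s1 s2 o ≤ 0 := hnot hmem
      have hSnn : 0 ≤ pvS s1 s2 o := by rw [pvS]; exact_mod_cast Nat.zero_le _
      rw [pvF]
      have : pvS s1 s2 o = 0 := le_antisymm hS0 hSnn
      rw [this, mul_zero]
    · rw [pvF]
      have : opts.count o = 0 := List.count_eq_zero.2 hmem
      rw [this]
      simp
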